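-- pv_equiv track=rewrite | github.com/shane-snyder/tam-scripts | operator_versions/operator_lifecycle_check.py | summarize_ocp_versions
-- ===== SOURCE A (Python) =====
-- def summarize_ocp_versions(versions):
--     """Condense a list like ['4.14','4.16','4.17','4.18'] into '4.14-4.18'."""
--     if not versions:
--         return "N/A"
--     if len(versions) == 1:
--         return versions[0]
--     try:
--         parsed = sorted(versions, key=lambda v: [int(x) for x in v.split(".")])
--         return f"{parsed[0]}-{parsed[-1]}"
--     except (ValueError, IndexError):
--         return ", ".join(versions)
-- ===== SOURCE B (Python) =====
-- def summarize_ocp_versions(versions):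
--     """Condense a list like ['4.14','4.16','4.17','4.18'] into '4.14-4.18'."""
--     if not versions:
--         return "N/A"
--     if len(versions) == 1:
--         return versions[0]
--     try:
--         keys = [[int(x) for x in v.split(".")] for v in versions]
--     except ValueError:
--         return ", ".join(versions)
--     vmin = vmax = versions[0]
--     kmin = kmax = keys[0]
--     for v, k in zip(versions[1:], keys[1:]):
--         if k < kmin:
--             vmin, kmin = v, k
--         if kmax <= k:
--             vmax, kmax = v, k
--     return f"{vmin}-{vmax}"
-- ===== Notes on version B (the rewrite author's own statement) =====
-- stated objective: alternative
-- what changed: Replaces sorting the whole list by key to read off its first and last element with a single min/max scan over the parsed keys (first minimum via strict <, last maximum via <=), keeping the same guards and the join fallback.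
import Mathlib
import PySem

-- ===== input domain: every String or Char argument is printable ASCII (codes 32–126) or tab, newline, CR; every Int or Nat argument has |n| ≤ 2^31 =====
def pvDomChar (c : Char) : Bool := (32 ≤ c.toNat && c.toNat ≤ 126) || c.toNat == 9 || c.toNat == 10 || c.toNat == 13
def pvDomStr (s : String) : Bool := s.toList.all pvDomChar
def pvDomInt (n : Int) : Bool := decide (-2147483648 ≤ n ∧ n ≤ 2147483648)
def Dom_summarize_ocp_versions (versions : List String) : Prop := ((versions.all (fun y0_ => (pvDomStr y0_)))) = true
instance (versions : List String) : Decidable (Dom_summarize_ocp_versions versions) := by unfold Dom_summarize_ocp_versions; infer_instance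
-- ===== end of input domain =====

-- B replaces A's full stable sort by a single min/max scan over the parsed keys (first minimum
-- via strict <, last maximum via <=), keeping the same guards and join fallback; objective:
-- alternative (a sort-free algorithm of similar overall cost, since parsing dominates).

-- ===== PORT A =====
-- v.split("."): separator "." is a nonempty literal, so split? is always some; getD [] is exact
def pvSplitDot (v : String) : List String := (PySem.Str.split? v ".").getD []

-- the sort key [int(x) for x in v.split(".")]; getD 0 is only evaluated under the all-parse guard
def pvKeyA (v : String) : List Int := (pvSplitDot v).map (fun x => (PySem.Int.ofStr? x).getD 0)

def summarize_ocp_versions (versions : List String) : String :=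
  match versions with
  | [] => "N/A"
  | [v] => v
  | _ =>
    -- try/except: sorted's key raises ValueError iff some component fails int(); IndexError is unreachable
    if versions.all (fun v => (pvSplitDot v).all (fun x => (PySem.Int.ofStr? x).isSome)) then
      let parsed := PySem.List.sorted versions pvKeyA false
      (parsed.headD "") ++ "-" ++ (parsed.getLastD "")
    else
      PySem.Str.join ", " versions

-- ===== PORT B =====
-- [int(x) for x in v.split(".")]; none = ValueError somewhere in the comprehension
def pvParseB (v : String) : Option (List Int) :=
  ((PySem.Str.split? v ".").getD []).mapM PySem.Int.ofStr?

def summarize_ocp_versions_alt (versions : List String) : String :=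
  if versions.isEmpty then "N/A"
  else if versions.length == 1 then versions.headD ""
  else
    match versions.mapM pvParseB with
    | none => PySem.Str.join ", " versions
    | some keys =>
      -- one pass: vmin/kmin first minimum (strict <), vmax/kmax last maximum (<=)
      let v0 := versions.headD ""
      let k0 := keys.headD []
      let st := ((versions.drop 1).zip (keys.drop 1)).foldl
        (fun (st : (String × List Int) × (String × List Int)) vk =>
          ((if vk.2 < st.1.2 then vk else st.1),
           (if st.2.2 ≤ vk.2 then vk else st.2)))
        ((v0, k0), (v0, k0))
      st.1.1 ++ "-" ++ st.2.1

-- ===== PRECONDITION & SPEC =====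
def Spec_summarize_ocp_versions (versions : List String) (out : String) : Prop := out = summarize_ocp_versions_alt versions
instance (versions : List String) (out : String) : Decidable (Spec_summarize_ocp_versions versions out) := by unfold Spec_summarize_ocp_versions; infer_instance

-- ===== CLAIM (what is proved, stated in full; the proofs are below) =====
def Claim_equal_summarize_ocp_versions : Prop := ∀ (versions : List String), Dom_summarize_ocp_versions versions → Spec_summarize_ocp_versions versions (summarize_ocp_versions versions)

-- ===== LEMMAS AND PROOFS =====

-- the min/max step B's loop performs, on bare elements
def pvStep {α : Type} (key : α → List Int) (st : α × α) (v : α) : α × α :=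
  (if key v < key st.1 then v else st.1, if key st.2 ≤ key v then v else st.2)

lemma pv_mapM_isSome {α β : Type} (f : α → Option β) :
    ∀ (xs : List α), (xs.mapM f).isSome = xs.all (fun x => (f x).isSome) := by
  intro xs
  induction xs with
  | nil => rfl
  | cons x t ih =>
    simp only [List.mapM_cons, List.all_cons]
    cases hfx : f x with
    | none => simp
    | some b =>
      simp only [Option.isSome_some, Bool.true_and]
      cases ht : t.mapM f with
      | none => simpa [ht] using ih
      | some l => simpa [ht] using ih

lemma pv_mapM_eq_some {α β : Type} (f : α → Option β) (d : β) :
    ∀ (xs : List α) (ys : List β), xs.mapM f = some ys → ys = xs.map (fun x => (f x).getD d) := by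
  intro xs
  induction xs with
  | nil => intro ys h; simpa using h.symm
  | cons x t ih =>
    intro ys h
    cases hfx : f x with
    | none => simp [List.mapM_cons, hfx] at h
    | some b =>
      cases ht : t.mapM f with
      | none => simp [List.mapM_cons, hfx, ht] at h
      | some l =>
        simp only [List.mapM_cons, hfx, ht] at h
        have hys : ys = b :: l := by simpa using h.symm
        subst hys
        simp [hfx, ih l ht]

lemma pv_parseB_isSome (v : String) :
    (pvParseB v).isSome = (pvSplitDot v).all (fun x => (PySem.Int.ofStr? x).isSome) := by
  simpa [pvParseB, pvSplitDot] using pv_mapM_isSome PySem.Int.ofStr? (pvSplitDot v)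

lemma pv_parseB_eq_some (v : String) (k : List Int) (h : pvParseB v = some k) : k = pvKeyA v := by
  simpa [pvKeyA, pvSplitDot] using pv_mapM_eq_some PySem.Int.ofStr? 0 _ k h

lemma pv_mapM_parseB_eq_some (rest : List String) (krest : List (List Int))
    (h : rest.mapM pvParseB = some krest) : krest = rest.map pvKeyA := by
  have h1 := pv_mapM_eq_some pvParseB [] rest krest h
  have h2 : rest.all (fun v => (pvParseB v).isSome) = true := by
    rw [← pv_mapM_isSome, h]; rfl
  rw [h1]
  apply List.map_congr_left
  intro v hv
  have := List.all_eq_true.mp h2 v hv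
  cases hpv : pvParseB v with
  | none => rw [hpv] at this; simp at this
  | some k => simp [pv_parseB_eq_some v k hpv]

lemma pv_zip_self_map {α β : Type} (g : α → β) :
    ∀ (l : List α), l.zip (l.map g) = l.map (fun a => (a, g a)) := by
  intro l; induction l with
  | nil => rfl
  | cons x t ih => simp [List.zip_cons_cons, ih]

lemma pv_insertBy_nil {α : Type} (bf : α → α → Bool) (x : α) :
    PySem.List.insertBy bf x [] = [x] := rfl

lemma pv_insertBy_cons {α : Type} (bf : α → α → Bool) (x y : α) (ys : List α) :
    PySem.List.insertBy bf x (y :: ys) =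
      if bf x y then x :: y :: ys else y :: PySem.List.insertBy bf x ys := rfl

lemma pv_insertBy_ne_nil {α : Type} (bf : α → α → Bool) (x : α) (acc : List α) :
    PySem.List.insertBy bf x acc ≠ [] := by
  cases acc with
  | nil => simp [pv_insertBy_nil]
  | cons y ys =>
    rw [pv_insertBy_cons]
    split <;> simp

lemma pv_insertBy_pairwise {α : Type} (key : α → List Int) (x : α) :
    ∀ (acc : List α), acc.Pairwise (fun a b => key a ≤ key b) →
      (PySem.List.insertBy (fun a b => decide (key a < key b)) x acc).Pairwise
        (fun a b => key a ≤ key b) := by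
  intro acc
  induction acc with
  | nil => intro _; simp [pv_insertBy_nil]
  | cons y ys ih =>
    intro hp
    rw [List.pairwise_cons] at hp
    rw [pv_insertBy_cons]
    split
    · rename_i hlt
      rw [decide_eq_true_iff] at hlt
      refine List.pairwise_cons.mpr ⟨?_, List.pairwise_cons.mpr hp⟩
      intro z hz
      rcases List.mem_cons.mp hz with hz | hz
      · exact hz ▸ le_of_lt hlt
      · exact le_of_lt (lt_of_lt_of_le hlt (hp.1 z hz))
    · rename_i hge
      rw [decide_eq_true_iff] at hge
      have hyx : key y ≤ key x := le_of_not_gt hge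
      refine List.pairwise_cons.mpr ⟨?_, ih hp.2⟩
      intro z hz
      rcases (PySem.List.mem_insertBy _ _ _ _).mp hz with hz | hz
      · exact hz ▸ hyx
      · exact hp.1 z hz

lemma pv_insertBy_headD {α : Type} (key : α → List Int) (x : α) (d : α)
    (acc : List α) (hne : acc ≠ []) :
    (PySem.List.insertBy (fun a b => decide (key a < key b)) x acc).headD d =
      if key x < key (acc.headD d) then x else acc.headD d := by
  cases acc with
  | nil => exact absurd rfl hne
  | cons y ys =>
    rw [pv_insertBy_cons, List.headD_cons]
    split
    · rename_i h; rw [decide_eq_true_iff] at h; simp [h]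
    · rename_i h; rw [decide_eq_true_eq] at h; simp [h]

lemma pv_getLastD_default {α : Type} (l : List α) (h : l ≠ []) (d1 d2 : α) :
    l.getLastD d1 = l.getLastD d2 := by
  rw [List.getLastD_eq_getLast?, List.getLastD_eq_getLast?,
    List.getLast?_eq_some_getLast h]
  rfl

lemma pv_insertBy_getLastD {α : Type} (key : α → List Int) (x : α) (d : α) :
    ∀ (acc : List α), acc ≠ [] → acc.Pairwise (fun a b => key a ≤ key b) →
    (PySem.List.insertBy (fun a b => decide (key a < key b)) x acc).getLastD d =
      if key (acc.getLastD d) ≤ key x then x else acc.getLastD d := by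
  intro acc
  induction acc with
  | nil => intro hne; exact absurd rfl hne
  | cons y ys ih =>
    intro _ hp
    rw [List.pairwise_cons] at hp
    cases ys with
    | nil =>
      rw [pv_insertBy_cons, pv_insertBy_nil]
      split
      · rename_i h; rw [decide_eq_true_iff] at h
        simp [List.getLastD, not_le.mpr h]
      · rename_i h; rw [decide_eq_true_eq] at h
        simp [List.getLastD, not_lt.mp h]
    | cons z zs =>
      have hlast_mem : (z :: zs).getLastD d ∈ z :: zs := by
        have := List.getLast_mem (l := z :: zs) (by simp)
        simp [List.getLastD_eq_getLast?,
          List.getLast?_eq_some_getLast (l := z :: zs) (by simp)]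
      rw [pv_insertBy_cons]
      split
      · have hswap : (y :: z :: zs).getLastD d = (z :: zs).getLastD d := by
          rw [List.getLastD_cons]
          exact pv_getLastD_default (z :: zs) (List.cons_ne_nil _ _) y d
        rename_i h; rw [decide_eq_true_iff] at h
        have hyx : key x < key ((z :: zs).getLastD d) :=
          lt_of_lt_of_le h (hp.1 _ hlast_mem)
        have hL : (x :: y :: z :: zs).getLastD d = (z :: zs).getLastD d := by
          rw [List.getLastD_cons]
          exact (pv_getLastD_default (y :: z :: zs) (List.cons_ne_nil _ _) x d).trans hswap
        rw [hL, hswap, if_neg (not_le.mpr hyx)]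
      · have hswap : (y :: z :: zs).getLastD d = (z :: zs).getLastD d := by
          rw [List.getLastD_cons]
          exact pv_getLastD_default (z :: zs) (List.cons_ne_nil _ _) y d
        have hne' : PySem.List.insertBy (fun a b => decide (key a < key b)) x (z :: zs) ≠ [] :=
          pv_insertBy_ne_nil _ _ _
        have hM : (y :: PySem.List.insertBy (fun a b => decide (key a < key b)) x (z :: zs)).getLastD d =
            (PySem.List.insertBy (fun a b => decide (key a < key b)) x (z :: zs)).getLastD d := by
          rw [List.getLastD_cons]
          exact pv_getLastD_default _ hne' y d
        rw [hM, ih (List.cons_ne_nil _ _) hp.2, hswap]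

lemma pv_foldl_ins_inv {α : Type} (key : α → List Int) (d : α) :
    ∀ (rest : List α) (acc : List α), acc ≠ [] →
      acc.Pairwise (fun a b => key a ≤ key b) →
      ((rest.foldl (fun acc x =>
          PySem.List.insertBy (fun a b => decide (key a < key b)) x acc) acc).headD d,
       (rest.foldl (fun acc x =>
          PySem.List.insertBy (fun a b => decide (key a < key b)) x acc) acc).getLastD d) =
        rest.foldl (pvStep key) (acc.headD d, acc.getLastD d) := by
  intro rest
  induction rest with
  | nil => intro acc _ _; rfl
  | cons x t ih =>
    intro acc hne hp
    simp only [List.foldl_cons]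
    rw [ih _ (pv_insertBy_ne_nil _ _ _) (pv_insertBy_pairwise key x acc hp),
      pv_insertBy_headD key x d acc hne, pv_insertBy_getLastD key x d acc hne hp]
    rfl

lemma pv_sorted_head_last {α : Type} (key : α → List Int) (d : α)
    (x0 : α) (rest : List α) :
    ((PySem.List.sorted (x0 :: rest) key false).headD d,
     (PySem.List.sorted (x0 :: rest) key false).getLastD d) =
      rest.foldl (pvStep key) (x0, x0) := by
  rw [PySem.List.sorted_eq_foldl_insertBy]
  have h0 : List.foldl (fun acc x =>
      PySem.List.insertBy (fun a b => decide (key a < key b)) x acc) [] (x0 :: rest) =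
      List.foldl (fun acc x =>
        PySem.List.insertBy (fun a b => decide (key a < key b)) x acc) [x0] rest := by
    rfl
  rw [h0, pv_foldl_ins_inv key d rest [x0] (List.cons_ne_nil _ _) (by simp)]
  rfl

lemma pv_stepB_eq {α : Type} (key : α → List Int) (v a b : α) :
    ((if ((v, key v) : α × List Int).2 < ((a, key a) : α × List Int).2 then (v, key v) else (a, key a)),
     (if ((b, key b) : α × List Int).2 ≤ ((v, key v) : α × List Int).2 then (v, key v) else (b, key b))) =
      (((pvStep key (a, b) v).1, key (pvStep key (a, b) v).1),
       ((pvStep key (a, b) v).2, key (pvStep key (a, b) v).2)) := by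
  unfold pvStep
  by_cases h1 : key v < key a <;> by_cases h2 : key b ≤ key v <;> simp [h1, h2]

-- B's fold carries (element, key) pairs; projecting to the elements gives pvStep
lemma pv_foldB_eq {α : Type} (key : α → List Int) :
    ∀ (rest : List α) (a b : α),
      rest.foldl
        (fun (st : (α × List Int) × (α × List Int)) v =>
          ((if key v < st.1.2 then (v, key v) else st.1),
           (if st.2.2 ≤ key v then (v, key v) else st.2)))
        ((a, key a), (b, key b)) =
      (((rest.foldl (pvStep key) (a, b)).1, key (rest.foldl (pvStep key) (a, b)).1),
       ((rest.foldl (pvStep key) (a, b)).2, key (rest.foldl (pvStep key) (a, b)).2)) := by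
  intro rest
  induction rest with
  | nil => intro a b; rfl
  | cons x t ih =>
    intro a b
    simp only [List.foldl_cons]
    rw [pv_stepB_eq key x a b]
    exact ih _ _

-- ===== VERDICT (by name: the statement is the Claim_ definition above) =====
theorem summarize_ocp_versions_spec : Claim_equal_summarize_ocp_versions := by
  intro versions _
  unfold Spec_summarize_ocp_versions
  match versions with
  | [] => rfl
  | [v] => rfl
  | v0 :: v1 :: rest =>
    have hlen : ((v0 :: v1 :: rest).length == 1) = false := by
      simp [List.length_cons]
    have hguard : ((v0 :: v1 :: rest).all
        (fun v => (pvSplitDot v).all (fun x => (PySem.Int.ofStr? x).isSome))) =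
        ((v0 :: v1 :: rest).mapM pvParseB).isSome := by
      rw [pv_mapM_isSome]
      simp only [pv_parseB_isSome]
    have hA : summarize_ocp_versions (v0 :: v1 :: rest) =
        (if ((v0 :: v1 :: rest).all
            (fun v => (pvSplitDot v).all (fun x => (PySem.Int.ofStr? x).isSome))) then
          (PySem.List.sorted (v0 :: v1 :: rest) pvKeyA false).headD "" ++ "-" ++
            (PySem.List.sorted (v0 :: v1 :: rest) pvKeyA false).getLastD ""
        else PySem.Str.join ", " (v0 :: v1 :: rest)) := rfl
    cases hall : (v0 :: v1 :: rest).mapM pvParseB with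
    | none =>
      rw [hall] at hguard
      rw [summarize_ocp_versions_alt, if_neg (by simp), if_neg (by rw [hlen]; simp), hall]
      rw [hA, hguard]
      rfl
    | some keys =>
      rw [hall] at hguard
      have hkeys : keys = (v0 :: v1 :: rest).map pvKeyA := pv_mapM_parseB_eq_some _ _ hall
      subst hkeys
      rw [summarize_ocp_versions_alt, if_neg (by simp), if_neg (by rw [hlen]; simp), hall]
      rw [hA, hguard]
      rw [List.map_cons]
      simp only [Option.isSome_some, if_true, List.headD_cons,
        List.drop_succ_cons, List.drop_zero]
      rw [pv_zip_self_map pvKeyA (v1 :: rest), List.foldl_map]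
      have hb := pv_foldB_eq pvKeyA (v1 :: rest) v0 v0
      have ha := pv_sorted_head_last pvKeyA "" v0 (v1 :: rest)
      rw [hb]
      have h1 : (PySem.List.sorted (v0 :: v1 :: rest) pvKeyA false).headD "" =
          ((v1 :: rest).foldl (pvStep pvKeyA) (v0, v0)).1 := congrArg Prod.fst ha
      have h2 : (PySem.List.sorted (v0 :: v1 :: rest) pvKeyA false).getLastD "" =
          ((v1 :: rest).foldl (pvStep pvKeyA) (v0, v0)).2 := congrArg Prod.snd ha
      rw [h1, h2]
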